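-- pv_equiv track=rewrite | github.com/miliar/Code_Jam_Webscraper | solutions_python/Problem_155/2847.py | get_audience_members
-- ===== SOURCE A (Python) =====
-- def get_audience_members(s_max, thresh_list):
--     total_extra_persons = 0
--     num_persons_standing = 0
--     for i in range(s_max+1):
--         if(num_persons_standing<i):
--             extra_required = (i-num_persons_standing);
--             total_extra_persons += extra_required
--             num_persons_standing += extra_required
--         num_persons_standing += thresh_list[i]
--     return total_extra_persons
-- ===== SOURCE B (Python) =====
-- def get_audience_members(s_max, thresh_list):
--     # Backward recurrence: `need` is the minimum number of persons that must
--     # already be standing when shyness level i is reached; entering level s_max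
--     # requires s_max standing, and entering level i requires max(i, need(i+1) - thresh_list[i]).
--     # The answer is the requirement at entry (level 0), i.e. the extras to hire up front.
--     if s_max < 0:
--         return 0
--     need = s_max
--     for i in range(s_max - 1, -1, -1):
--         need = max(i, need - thresh_list[i])
--     return need
-- ===== Notes on version B (the rewrite author's own statement) =====
-- stated objective: alternative
-- what changed: Replaces A's forward greedy simulation (two counters, patching the standing count and summing the patches) with a backward recurrence over the levels computing the minimal standing count required at entry to each level; the answer is the requirement at level 0.
import Mathlib
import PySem

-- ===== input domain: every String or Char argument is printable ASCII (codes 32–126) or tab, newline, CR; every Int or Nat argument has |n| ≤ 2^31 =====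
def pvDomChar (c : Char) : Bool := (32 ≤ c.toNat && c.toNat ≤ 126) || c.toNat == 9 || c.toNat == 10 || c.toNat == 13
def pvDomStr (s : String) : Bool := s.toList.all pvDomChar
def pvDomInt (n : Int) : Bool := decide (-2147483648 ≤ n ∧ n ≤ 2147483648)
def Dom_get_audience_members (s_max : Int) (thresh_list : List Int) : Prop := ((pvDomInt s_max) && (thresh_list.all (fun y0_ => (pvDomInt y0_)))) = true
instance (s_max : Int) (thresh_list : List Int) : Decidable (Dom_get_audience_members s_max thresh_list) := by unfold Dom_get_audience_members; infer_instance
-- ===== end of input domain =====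

-- B replaces A's forward greedy simulation with a backward minimal-requirement recurrence (alternative decomposition, same cost).


-- ===== PORT A =====
-- loop body of A: state = (total_extra_persons, num_persons_standing)
def stepA (thresh_list : List Int) (st : Int × Int) (i : Int) : Int × Int :=
  if st.2 < i then
    let extra := i - st.2
    (st.1 + extra, st.2 + extra + PySem.List.pyGetD thresh_list i 0)
  else
    (st.1, st.2 + PySem.List.pyGetD thresh_list i 0)

def get_audience_members (s_max : Int) (thresh_list : List Int) : Int :=
  ((PySem.List.pyRange 0 (s_max + 1) 1).foldl (stepA thresh_list) (0, 0)).1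

-- ===== PORT B =====
-- loop body of B: `need` = minimal standing count required at entry to level i
def stepB (thresh_list : List Int) (need : Int) (i : Int) : Int :=
  max i (need - PySem.List.pyGetD thresh_list i 0)

def get_audience_members_alt (s_max : Int) (thresh_list : List Int) : Int :=
  if s_max < 0 then 0
  else (PySem.List.pyRange (s_max - 1) (-1) (-1)).foldl (stepB thresh_list) s_max

-- ===== PRECONDITION & SPEC =====
-- Pre_: A's loop reads thresh_list[i] for every 0 ≤ i ≤ s_max, so the Python A raises
-- IndexError exactly when s_max ≥ len(thresh_list); for s_max < 0 the range is empty.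
def Pre_get_audience_members (s_max : Int) (thresh_list : List Int) : Prop :=
  s_max < (thresh_list.length : Int)
instance (s_max : Int) (thresh_list : List Int) : Decidable (Pre_get_audience_members s_max thresh_list) := by unfold Pre_get_audience_members; infer_instance
def pvWitness_get_audience_members : Int × List Int := (2, [0, 2, 1])

def Spec_get_audience_members (s_max : Int) (thresh_list : List Int) (out : Int) : Prop := out = get_audience_members_alt s_max thresh_list
instance (s_max : Int) (thresh_list : List Int) (out : Int) : Decidable (Spec_get_audience_members s_max thresh_list out) := by unfold Spec_get_audience_members; infer_instance

-- ===== CLAIM (what is proved, stated in full; the proofs are below) =====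
def Claim_equal_get_audience_members : Prop := ∀ (s_max : Int) (thresh_list : List Int), Dom_get_audience_members s_max thresh_list → Pre_get_audience_members s_max thresh_list → Spec_get_audience_members s_max thresh_list (get_audience_members s_max thresh_list)

-- ===== LEMMAS AND PROOFS =====

-- requirement at entry to level j when k more levels follow (closed recursive form shared by both proofs)
def Ereq (tl : List Int) : Nat → Nat → Int
  | j, 0 => (j : Int)
  | j, k+1 => max (j : Int) (Ereq tl (j+1) k - PySem.List.pyGetD tl (j : Int) 0)

theorem le_Ereq (tl : List Int) (j k : Nat) : (j : Int) ≤ Ereq tl j k := by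
  cases k with
  | zero => simp [Ereq]
  | succ k => simp [Ereq]

-- the descending index list [m-1, …, 0]
def descList (m : Nat) : List Int := (List.range m).map (fun k => (m : Int) - 1 - Int.ofNat k)

theorem pyRange_down (m : Nat) :
    PySem.List.pyRange ((m : Int) - 1) (-1) (-1) = descList m := by
  simp only [PySem.List.pyRange, descList]
  cases m with
  | zero => norm_num
  | succ m =>
    have h1 : ((-1 : Int) < (↑(m+1) : Int) - 1) := by push_cast; omega
    have h2 : ¬ ((0:Int) < -1) := by norm_num
    rw [if_neg (by norm_num : ¬ (-1:Int) = 0), if_neg h2, if_pos h1]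
    have hc : (((↑(m+1) : Int) - 1 - -1 + - -1 - 1) / - -1).toNat = m + 1 := by push_cast; omega
    rw [hc]
    apply List.map_congr_left
    intro k _
    simp only [Int.ofNat_eq_natCast]
    push_cast; ring

theorem desc_succ (j : Nat) : descList (j+1) = (j : Int) :: descList j := by
  simp only [descList]
  rw [List.range_succ_eq_map]
  simp only [List.map_cons, List.map_map]
  congr 1
  · simp only [Int.ofNat_eq_natCast]; push_cast; ring
  apply List.map_congr_left
  intro k _
  simp only [Function.comp, Int.ofNat_eq_natCast]
  push_cast; ring

-- B's backward fold computes Ereq 0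
theorem foldB (tl : List Int) (j k : Nat) :
    (descList j).foldl (stepB tl) (Ereq tl j k) = Ereq tl 0 (j + k) := by
  induction j generalizing k with
  | zero => simp [descList]
  | succ j ih =>
    rw [desc_succ, List.foldl_cons]
    have hs : stepB tl (Ereq tl (j+1) k) (j : Int) = Ereq tl j (k+1) := by
      simp [stepB, Ereq]
    rw [hs, ih (k+1)]
    congr 1
    omega

-- proof-only forward helper: A's state (total, standing) tracks (md, running) with standing = running + md
def stepF (tl : List Int) (st : Int × Int) (i : Int) : Int × Int :=
  (max st.1 (i - st.2), st.2 + PySem.List.pyGetD tl i 0)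

theorem step_comm (tl : List Int) (m r i : Int) :
    stepA tl (m, r + m) i = ((stepF tl (m, r) i).1, (stepF tl (m, r) i).2 + (stepF tl (m, r) i).1) := by
  simp only [stepA, stepF]
  split_ifs with h <;> refine Prod.ext ?_ ?_ <;> simp <;> omega

theorem fold_comm (tl : List Int) (l : List Int) : ∀ m r : Int,
    l.foldl (stepA tl) (m, r + m) =
      ((l.foldl (stepF tl) (m, r)).1,
       (l.foldl (stepF tl) (m, r)).2 + (l.foldl (stepF tl) (m, r)).1) := by
  induction l with
  | nil => intro m r; simp
  | cons i l ih =>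
    intro m r
    simp only [List.foldl_cons, step_comm]
    simpa using ih (stepF tl (m, r) i).1 (stepF tl (m, r) i).2

-- the forward max-deficit fold also computes Ereq
theorem foldF (tl : List Int) (k : Nat) : ∀ (j : Nat) (m r : Int),
    (((List.range' j (k+1)).map Int.ofNat).foldl (stepF tl) (m, r)).1 =
      max m (Ereq tl j k - r) := by
  induction k with
  | zero =>
    intro j m r
    simp only [List.range', List.map_cons, List.map_nil, List.foldl_cons, List.foldl_nil, Ereq,
      stepF, Int.ofNat_eq_natCast]
  | succ k ih =>
    intro j m r
    have hsplit : List.range' j (k+1+1) = j :: List.range' (j+1) (k+1) := rfl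
    rw [hsplit, List.map_cons, List.foldl_cons]
    have hF : stepF tl (m, r) (Int.ofNat j) =
        (max m (Int.ofNat j - r), r + PySem.List.pyGetD tl (Int.ofNat j) 0) := rfl
    rw [hF, ih (j+1)]
    simp only [Ereq, Int.ofNat_eq_natCast]
    omega

-- ===== VERDICT (by name: the statement is the Claim_ definition above) =====
theorem get_audience_members_spec : Claim_equal_get_audience_members := by
  intro s tl _ _
  show get_audience_members s tl = get_audience_members_alt s tl
  unfold get_audience_members get_audience_members_alt
  by_cases hs : s < 0
  · rw [if_pos hs]
    have hempty : PySem.List.pyRange 0 (s + 1) 1 = [] := by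
      simp only [PySem.List.pyRange]
      norm_num
      intro h
      omega
    rw [hempty]
    rfl
  · rw [if_neg hs]
    rw [Int.not_lt] at hs
    obtain ⟨n, rfl⟩ : ∃ n : Nat, s = (n : Int) := ⟨s.toNat, (Int.toNat_of_nonneg hs).symm⟩
    -- A side
    have hA : ((PySem.List.pyRange 0 ((n:Int) + 1) 1).foldl (stepA tl) (0, 0)).1 = Ereq tl 0 n := by
      have hr : PySem.List.pyRange 0 ((n:Int) + 1) 1 =
          (List.range' 0 (n+1)).map Int.ofNat := by
        rw [PySem.List.pyRange_one]
        rw [← List.range_eq_range']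
        have hn : ((n:Int) + 1 - 0).toNat = n + 1 := by omega
        rw [hn]
        apply List.map_congr_left
        intro k _
        simp only [Int.ofNat_eq_natCast]
        omega
      rw [hr]
      have := fold_comm tl ((List.range' 0 (n+1)).map Int.ofNat) 0 0
      simp only [add_zero] at this
      rw [this, foldF]
      have h0 := le_Ereq tl 0 n
      simp only [Nat.cast_zero] at h0 ⊢
      omega
    -- B side
    have hB : ((PySem.List.pyRange ((n:Int) - 1) (-1) (-1)).foldl (stepB tl) (n : Int)) = Ereq tl 0 n := by
      rw [pyRange_down n]
      have hstart : ((n : Nat) : Int) = Ereq tl n 0 := rfl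
      rw [hstart]
      have := foldB tl n 0
      simpa using this
    rw [hA, hB]
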